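-- pv_equiv track=rewrite | github.com/d2207197/smttoktag | medal_tasks.py | en_pattern_rename
-- ===== SOURCE A (Python) =====
-- from collections import Counter, defaultdict
--
-- def en_pattern_rename(en_pattern):
--     en_pattern = en_pattern.split()
--     tags_cnt = Counter(en_pattern)
--     tags_gt_1_cnt = {tag: cnt for tag, cnt in tags_cnt.items() if cnt > 1}
--     new_en_pattern = []
--     for tag in reversed(en_pattern):
--         if tag in tags_gt_1_cnt:
--             new_tag = tag + str(tags_gt_1_cnt[tag])
--             tags_gt_1_cnt[tag] -= 1
--             tag = new_tag
--
--         new_en_pattern.append(tag)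
--     return ' '.join(reversed(new_en_pattern))
-- ===== SOURCE B (Python) =====
-- def en_pattern_rename(en_pattern):
--     toks = en_pattern.split()
--     pos = {}
--     for i, t in enumerate(toks):
--         pos.setdefault(t, []).append(i)
--     out = [t if len(pos[t]) == 1 else t + str(pos[t].index(i) + 1)
--            for i, t in enumerate(toks)]
--     return ' '.join(out)
-- ===== Notes on version B (the rewrite author's own statement) =====
-- stated objective: alternative
-- what changed: Replaces A's Counter-plus-filtered-countdown-dict and reverse traversal (with a final double reversal) by a single tag->positions index built in one forward enumerate pass, from which each token's suffix is read off directly (its rank = positions.index(i)+1) in a forward comprehension.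
import Mathlib
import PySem

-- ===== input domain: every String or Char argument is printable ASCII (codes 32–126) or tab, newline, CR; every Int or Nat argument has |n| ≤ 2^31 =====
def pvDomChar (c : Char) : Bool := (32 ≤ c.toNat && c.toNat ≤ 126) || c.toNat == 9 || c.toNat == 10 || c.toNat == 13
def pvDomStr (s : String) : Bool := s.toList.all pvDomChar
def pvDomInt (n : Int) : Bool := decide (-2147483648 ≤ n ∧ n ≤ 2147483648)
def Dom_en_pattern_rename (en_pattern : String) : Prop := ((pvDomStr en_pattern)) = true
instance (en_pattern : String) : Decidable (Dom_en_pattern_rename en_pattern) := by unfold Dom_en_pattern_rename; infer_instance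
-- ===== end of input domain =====

-- B replaces A's reverse walk with a countdown dict by a forward-built tag->positions index
-- read off directly per token (alternative decomposition, same asymptotic cost).

-- ===== PORT A =====
def en_pattern_rename (en_pattern : String) : String :=
  let toks := PySem.Str.split₀ en_pattern
  let tagsCnt := PySem.Dict.counter toks
  let tagsGt1 := tagsCnt.items.foldl
    (fun d p => if 1 < p.2 then d.insert p.1 p.2 else d) PySem.Dict.empty
  let st := toks.reverse.foldl
    (fun (st : PySem.Dict String Int × List String) tag =>
      if st.1.contains tag then
        (st.1.insert tag (st.1.getD tag 0 - 1),
         st.2 ++ [tag ++ PySem.Int.toStr (st.1.getD tag 0)])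
      else (st.1, st.2 ++ [tag]))
    (tagsGt1, ([] : List String))
  PySem.Str.join " " st.2.reverse

-- ===== PORT B =====
-- 'pos[t].index(i)' always succeeds in Source B (i was appended to pos[t]); the Option is
-- discharged with getD 0, which is never the value actually used.
def en_pattern_rename_alt (en_pattern : String) : String :=
  let toks := PySem.Str.split₀ en_pattern
  let pos := toks.zipIdx.foldl
    (fun d p => d.modify p.1 [] (fun x => x ++ [p.2])) PySem.Dict.empty
  let out := toks.zipIdx.map (fun p =>
    if (pos.getD p.1 []).length == 1 then p.1
    else p.1 ++ PySem.Int.toStr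
      ((((PySem.List.index? (pos.getD p.1 []) p.2).getD 0 + 1 : Nat) : Int)))
  PySem.Str.join " " out

-- ===== PRECONDITION & SPEC =====
def Spec_en_pattern_rename (en_pattern : String) (out : String) : Prop := out = en_pattern_rename_alt en_pattern
instance (en_pattern : String) (out : String) : Decidable (Spec_en_pattern_rename en_pattern out) := by unfold Spec_en_pattern_rename; infer_instance

-- ===== CLAIM (what is proved, stated in full; the proofs are below) =====
def Claim_equal_en_pattern_rename : Prop := ∀ (en_pattern : String), Dom_en_pattern_rename en_pattern → Spec_en_pattern_rename en_pattern (en_pattern_rename en_pattern)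

-- ===== LEMMAS AND PROOFS =====

-- The common normal form: token j of the output is toks[j], suffixed with the number of
-- occurrences of toks[j] in toks[0..j] when toks[j] occurs more than once in all of toks.
def pvOut (cnt : String → Nat) (pre : List String) : List String :=
  pre.zipIdx.map (fun p =>
    if 1 < cnt p.1 then p.1 ++ PySem.Int.toStr (((pre.take (p.2 + 1)).count p.1 : Int))
    else p.1)

-- positions of tag t among toks, indices starting at n
def pvPos (n : Nat) (toks : List String) (t : String) : List Nat :=
  ((toks.zipIdx n).filter (fun p => p.1 == t)).map (fun p => p.2)

theorem pvPos_cons (n : Nat) (a : String) (l : List String) (t : String) :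
    pvPos n (a :: l) t = if a = t then n :: pvPos (n + 1) l t else pvPos (n + 1) l t := by
  simp only [pvPos, List.zipIdx_cons, List.filter_cons]
  by_cases h : a = t <;> simp [h]

theorem pvPos_length (toks : List String) : ∀ (n : Nat) (t : String),
    (pvPos n toks t).length = toks.count t := by
  induction toks with
  | nil => intro n t; simp [pvPos]
  | cons a l ih =>
    intro n t
    rw [pvPos_cons]
    by_cases h : a = t <;> simp [h, ih]

theorem pvPos_index (toks : List String) : ∀ (n j : Nat) (h : j < toks.length),
    ∃ m, PySem.List.index? (pvPos n toks toks[j]) (n + j) = some m ∧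
      m + 1 = (toks.take (j + 1)).count toks[j] := by
  induction toks with
  | nil => intro n j h; simp at h
  | cons a l ih =>
    intro n j h
    cases j with
    | zero =>
      refine ⟨0, ?_, ?_⟩
      · simp [pvPos_cons, PySem.List.index?, List.idxOf?_cons]
      · simp
    | succ j =>
      have hj : j < l.length := by simpa using h
      have hget : (a :: l)[j + 1] = l[j] := by simp
      rw [hget]
      by_cases hat : a = l[j]
      · obtain ⟨m, hm, hc⟩ := ih (n + 1) j hj
        refine ⟨m + 1, ?_, ?_⟩
        · rw [pvPos_cons, if_pos hat]
          simp only [PySem.List.index?, List.idxOf?_cons]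
          have : (n == n + (j + 1)) = false := by rw [beq_eq_false_iff_ne]; omega
          rw [this]
          simp only [PySem.List.index?] at hm
          have : n + (j + 1) = n + 1 + j := by omega
          rw [if_neg (by simp), this, hm]
          rfl
        · rw [List.take_succ_cons, List.count_cons,
            show (a == l[j]) = true from beq_iff_eq.mpr hat, if_pos rfl]
          omega
      · obtain ⟨m, hm, hc⟩ := ih (n + 1) j hj
        refine ⟨m, ?_, ?_⟩
        · rw [pvPos_cons, if_neg hat]
          have : n + (j + 1) = n + 1 + j := by omega
          rw [this, hm]
        · rw [List.take_succ_cons, List.count_cons,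
            show (a == l[j]) = false from beq_eq_false_iff_ne.mpr hat, if_neg (by simp)]
          omega

-- ===== B side =====

theorem alt_eq_pvOut (toks : List String) :
    (toks.zipIdx.map (fun p =>
      if ((toks.zipIdx.foldl (fun d p => d.modify p.1 [] (fun x => x ++ [p.2]))
            PySem.Dict.empty).getD p.1 []).length == 1 then p.1
      else p.1 ++ PySem.Int.toStr
        ((((PySem.List.index? ((toks.zipIdx.foldl (fun d p => d.modify p.1 [] (fun x => x ++ [p.2]))
            PySem.Dict.empty).getD p.1 []) p.2).getD 0 + 1 : Nat) : Int))))
    = pvOut (fun t => toks.count t) toks := by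
  have hpos : ∀ t, (toks.zipIdx.foldl (fun d p => d.modify p.1 [] (fun x => x ++ [p.2]))
      PySem.Dict.empty).getD t [] = pvPos 0 toks t := by
    intro t
    rw [PySem.Dict.getD_foldl_modify_append, PySem.Dict.getD_empty]
    rfl
  unfold pvOut
  apply List.map_congr_left
  intro p hp
  obtain ⟨t, j⟩ := p
  obtain ⟨-, hjlen, hget⟩ := List.mem_zipIdx hp
  simp only at hjlen hget ⊢
  have hjlen' : j < toks.length := by omega
  simp only [Nat.sub_zero] at hget
  rw [hget]
  rw [hpos]
  obtain ⟨m, hm, hc⟩ := pvPos_index toks 0 j hjlen'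
  have hmem : toks[j] ∈ toks := List.getElem_mem hjlen'
  have hcnt1 : 1 ≤ toks.count toks[j] := List.one_le_count_iff.mpr hmem
  rw [pvPos_length]
  by_cases hgt : 1 < toks.count toks[j]
  · have : (toks.count toks[j] == 1) = false := by simp; omega
    rw [this, if_pos hgt]
    have h0 : (0 : Nat) + j = j := by omega
    rw [h0] at hm
    rw [hm]
    simp [hc]
  · have hone : toks.count toks[j] = 1 := by omega
    rw [hone]
    simp

-- ===== A side =====

-- the initial dict {tag: cnt for tag, cnt in Counter(toks).items() if cnt > 1}
theorem gt1_items (toks : List String) :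
    ((PySem.Dict.counter toks).items.foldl
      (fun d p => if 1 < p.2 then d.insert p.1 p.2 else d) PySem.Dict.empty).items
    = ((PySem.Set.ofList toks).filter
        (fun k => decide (1 < ((toks.count k : Int))))).map (fun k => (k, (toks.count k : Int))) := by
  rw [PySem.List.foldl_ite_eq_foldl_filter (p := fun p : String × Int => 1 < p.2)
      (f := fun d p => PySem.Dict.insert d p.1 p.2)]
  rw [PySem.Dict.items_counter, List.filter_map]
  have h0 : ∀ a ∈ (((PySem.Set.ofList toks).filter
        ((fun x : String × Int => decide (1 < x.2)) ∘ fun k => (k, (toks.count k : Int)))).map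
        (fun k => (k, (toks.count k : Int)))),
      (PySem.Dict.empty : PySem.Dict String Int).contains a.1 = false :=
    fun a _ => PySem.Dict.contains_empty _
  have h2 : ((((PySem.Set.ofList toks).filter
        ((fun x : String × Int => decide (1 < x.2)) ∘ fun k => (k, (toks.count k : Int)))).map
        (fun k => (k, (toks.count k : Int)))).map (fun p : String × Int => p.1)).Nodup := by
    rw [List.map_map]
    have hco : ((fun p : String × Int => p.1) ∘ fun k : String => (k, (toks.count k : Int)))
        = fun k => k := rfl
    rw [hco, List.map_id']
    exact (PySem.Set.nodup_ofList toks).filter _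
  rw [PySem.Dict.items_foldl_insert_fresh _ (fun p : String × Int => p.1)
      (fun p : String × Int => p.2) PySem.Dict.empty h0 h2]
  show [] ++ _ = _
  rw [List.nil_append, List.map_map]
  rfl

theorem gt1_keys_nodup (toks : List String) :
    ((PySem.Dict.counter toks).items.foldl
      (fun d p => if 1 < p.2 then d.insert p.1 p.2 else d) PySem.Dict.empty).keys.Nodup := by
  simp only [PySem.Dict.keys]
  rw [gt1_items, List.map_map]
  have hco : ((fun p : String × Int => p.1) ∘ fun k : String => (k, (toks.count k : Int)))
      = fun k => k := rfl
  rw [hco, List.map_id']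
  exact (PySem.Set.nodup_ofList toks).filter _

theorem gt1_contains (toks : List String) (t : String) :
    ((PySem.Dict.counter toks).items.foldl
      (fun d p => if 1 < p.2 then d.insert p.1 p.2 else d) PySem.Dict.empty).contains t
    = decide (1 < toks.count t) := by
  have hk : ((PySem.Dict.counter toks).items.foldl
      (fun d p => if 1 < p.2 then d.insert p.1 p.2 else d) PySem.Dict.empty).keys
      = (PySem.Set.ofList toks).filter (fun k => decide (1 < ((toks.count k : Int)))) := by
    simp only [PySem.Dict.keys]
    rw [gt1_items, List.map_map]
    have hco : ((fun p : String × Int => p.1) ∘ fun k : String => (k, (toks.count k : Int)))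
        = fun k => k := rfl
    rw [hco, List.map_id']
  have hmem : (((PySem.Dict.counter toks).items.foldl
      (fun d p => if 1 < p.2 then d.insert p.1 p.2 else d) PySem.Dict.empty).contains t = true)
      ↔ 1 < toks.count t := by
    rw [PySem.Dict.contains_iff_mem_keys, hk]
    simp only [List.mem_filter, PySem.Set.mem_ofList, decide_eq_true_eq]
    constructor
    · rintro ⟨-, h⟩; exact_mod_cast h
    · intro h
      refine ⟨List.one_le_count_iff.mp (by omega), by exact_mod_cast h⟩
  exact Bool.eq_iff_iff.mpr (by simpa using hmem)

theorem gt1_getD (toks : List String) (t : String) (h : 1 < toks.count t) :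
    ((PySem.Dict.counter toks).items.foldl
      (fun d p => if 1 < p.2 then d.insert p.1 p.2 else d) PySem.Dict.empty).getD t 0
    = (toks.count t : Int) := by
  apply PySem.Dict.getD_of_mem_items _ _ (gt1_keys_nodup toks)
  rw [gt1_items]
  exact List.mem_map.mpr ⟨t, List.mem_filter.mpr
    ⟨(PySem.Set.mem_ofList toks t).mpr (List.one_le_count_iff.mp (by omega)),
     by simp; exact_mod_cast h⟩, rfl⟩

-- pvOut over an extended prefix: the new last token is numbered with its full count.
theorem pvOut_append (cnt : String → Nat) (pre : List String) (t0 : String) :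
    pvOut cnt (pre ++ [t0]) = pvOut cnt pre ++
      [if 1 < cnt t0 then t0 ++ PySem.Int.toStr (((pre ++ [t0]).count t0 : Int)) else t0] := by
  unfold pvOut
  rw [List.zipIdx_append, List.map_append]
  congr 1
  · apply List.map_congr_left
    intro p hp
    obtain ⟨t, j⟩ := p
    obtain ⟨-, hjlen, -⟩ := List.mem_zipIdx hp
    simp only at hjlen ⊢
    rw [List.take_append_of_le_length (by omega)]
  · have ht : List.take (pre.length + 1) (pre ++ [t0]) = pre ++ [t0] :=
      List.take_of_length_le (by simp)
    simp [ht, List.count_append]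

-- A's reverse loop, processed suffix by suffix: given a countdown dict holding the
-- counts of the still-unprocessed prefix (for tags occurring more than once in toks),
-- the loop emits pvOut of the prefix, reversed, appended to acc.
theorem a_loop (toks : List String) (pre : List String) :
    ∀ (d : PySem.Dict String Int) (acc : List String),
    (∀ t, d.contains t = decide (1 < toks.count t)) →
    (∀ t, 1 < toks.count t → d.getD t 0 = (pre.count t : Int)) →
    ∃ d', pre.reverse.foldl
      (fun (st : PySem.Dict String Int × List String) tag =>
        if st.1.contains tag then
          (st.1.insert tag (st.1.getD tag 0 - 1),
           st.2 ++ [tag ++ PySem.Int.toStr (st.1.getD tag 0)])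
        else (st.1, st.2 ++ [tag]))
      (d, acc) = (d', acc ++ (pvOut (fun t => toks.count t) pre).reverse) := by
  induction pre using List.reverseRecOn with
  | nil => intro d acc _ _; exact ⟨d, by simp [pvOut]⟩
  | append_singleton pre t0 ih =>
    intro d acc hcont hgetD
    rw [List.reverse_append, List.reverse_singleton, List.singleton_append, List.foldl_cons]
    rw [pvOut_append, List.reverse_append, List.reverse_singleton, List.singleton_append]
    by_cases hgt : 1 < toks.count t0
    · rw [if_pos (show d.contains t0 = true by rw [hcont t0]; simp [hgt])]
      have hd0 : d.getD t0 0 = ((pre ++ [t0]).count t0 : Int) := hgetD t0 hgt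
      have hcnt : (pre ++ [t0]).count t0 = pre.count t0 + 1 := by
        simp [List.count_append]
      rw [if_pos hgt, ← hd0]
      obtain ⟨d', hd'⟩ := ih (d.insert t0 (d.getD t0 0 - 1))
        (acc ++ [t0 ++ PySem.Int.toStr (d.getD t0 0)])
        (by
          intro t
          rw [PySem.Dict.contains_insert, hcont t]
          by_cases ht : t = t0
          · subst ht; simp [hgt]
          · simp [ht])
        (by
          intro t ht
          rw [PySem.Dict.getD_insert]
          by_cases h : t = t0
          · subst h
            rw [if_pos rfl, hd0, hcnt]
            push_cast; ring
          · rw [if_neg h, hgetD t ht, List.count_append]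
            have hz : [t0].count t = 0 := by simp [Ne.symm h]
            rw [hz]; simp)
      rw [List.append_assoc, List.singleton_append] at hd'
      exact ⟨d', hd'⟩
    · rw [if_neg (show ¬ d.contains t0 = true by rw [hcont t0]; simp [hgt]), if_neg hgt]
      obtain ⟨d', hd'⟩ := ih d (acc ++ [t0]) hcont
        (by
          intro t ht
          rw [hgetD t ht, List.count_append]
          have hne : t ≠ t0 := by intro hh; rw [hh] at ht; omega
          have hz : [t0].count t = 0 := by simp [Ne.symm hne]
          rw [hz]; simp)
      rw [List.append_assoc, List.singleton_append] at hd'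
      exact ⟨d', hd'⟩

-- ===== VERDICT (by name: the statement is the Claim_ definition above) =====
set_option maxHeartbeats 1000000 in
theorem en_pattern_rename_spec : Claim_equal_en_pattern_rename := by
  intro s _
  show en_pattern_rename s = en_pattern_rename_alt s
  have H := a_loop (PySem.Str.split₀ s) (PySem.Str.split₀ s)
    ((PySem.Dict.counter (PySem.Str.split₀ s)).items.foldl
      (fun (d : PySem.Dict String Int) (p : String × Int) =>
        if 1 < p.2 then d.insert p.1 p.2 else d) PySem.Dict.empty)
    [] (gt1_contains (PySem.Str.split₀ s)) (fun t ht => gt1_getD (PySem.Str.split₀ s) t ht)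
  obtain ⟨d', hd'⟩ := H
  simp only [en_pattern_rename, en_pattern_rename_alt]
  rw [hd', alt_eq_pvOut]
  simp
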